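-- pv_equiv track=rewrite | github.com/cnu-cse-datacom/4-week-dataoversound-ack-YoonJu826 | DC02_04_201502091_LeeYunJu.py | decode_bitchunks
-- ===== SOURCE A (Python) =====
-- def decode_bitchunks(chunk_bits, chunks):
--     out_bytes = []
--
--     next_read_chunk = 0
--     next_read_bit = 0
--
--     byte = 0
--     bits_left = 8
--     while next_read_chunk < len(chunks):
--         can_fill = chunk_bits - next_read_bit
--         to_fill = min(bits_left, can_fill)
--         offset = chunk_bits - next_read_bit - to_fill
--         byte <<= to_fill
--         shifted = chunks[next_read_chunk] & (((1 << to_fill) - 1) << offset)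
--         byte |= shifted >> offset;
--         bits_left -= to_fill
--         next_read_bit += to_fill
--         if bits_left <= 0:
--
--             out_bytes.append(byte)
--             byte = 0
--             bits_left = 8
--
--         if next_read_bit >= chunk_bits:
--             next_read_chunk += 1
--             next_read_bit -= chunk_bits
--
--     return out_bytes
-- ===== SOURCE B (Python) =====
-- def decode_bitchunks(chunk_bits, chunks):
--     # Flatten all chunks into one MSB-first bit list, then regroup in full bytes.
--     bits = [(c >> (chunk_bits - 1 - j)) & 1 for c in chunks for j in range(chunk_bits)]
--     out_bytes = []
--     for i in range(0, len(bits) - 7, 8):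
--         byte = 0
--         for bit in bits[i:i + 8]:
--             byte = byte * 2 + bit
--         out_bytes.append(byte)
--     return out_bytes
-- ===== Notes on version B (the rewrite author's own statement) =====
-- stated objective: simpler
-- what changed: B flattens all chunks into one MSB-first bit list and then regroups it in fixed steps of 8 into full bytes, replacing A's single loop that maintains two read cursors, a partial-byte accumulator and bit-field mask/shift extraction.
import Mathlib
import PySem

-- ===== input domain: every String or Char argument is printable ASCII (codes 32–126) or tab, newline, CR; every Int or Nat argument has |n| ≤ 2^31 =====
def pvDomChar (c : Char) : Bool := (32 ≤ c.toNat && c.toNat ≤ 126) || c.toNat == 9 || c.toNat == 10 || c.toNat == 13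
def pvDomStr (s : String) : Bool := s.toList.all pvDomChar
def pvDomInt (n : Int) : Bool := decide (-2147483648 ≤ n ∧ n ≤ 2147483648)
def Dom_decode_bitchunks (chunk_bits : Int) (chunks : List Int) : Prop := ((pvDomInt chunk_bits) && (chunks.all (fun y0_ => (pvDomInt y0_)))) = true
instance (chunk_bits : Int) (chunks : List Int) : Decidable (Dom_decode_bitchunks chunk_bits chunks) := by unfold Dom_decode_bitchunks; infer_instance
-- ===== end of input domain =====

-- B flattens the chunks into one MSB-first bit list and regroups it into full bytes,
-- replacing A's two-cursor partial-byte state machine (objective: simpler; same asymptotic cost).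


-- ===== PORT A =====
-- Literal port of A's while-loop. The fuel is a termination bound only: under
-- Pre_ the loop always ends before the fuel does (proved below).  Shift amounts
-- go through .toNat; they are nonnegative whenever the loop runs under Pre_
-- (Python raises ValueError on a negative shift — excluded by Pre_).
def decode_bitchunks_loop (chunk_bits : Int) (chunks : List Int) (fuel : Nat)
    (next_read_chunk next_read_bit byte bits_left : Int) (out_bytes : List Int) : List Int :=
  match fuel with
  | 0 => out_bytes
  | fuel + 1 =>
    if next_read_chunk < (chunks.length : Int) then
      let can_fill := chunk_bits - next_read_bit
      let to_fill := min bits_left can_fill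
      let offset := chunk_bits - next_read_bit - to_fill
      let byte1 := byte <<< to_fill.toNat
      let shifted := PySem.Int.band (PySem.List.pyGetD chunks next_read_chunk 0)
        ((((1:Int) <<< to_fill.toNat) - 1) <<< offset.toNat)
      let byte2 := PySem.Int.bor byte1 (shifted >>> offset.toNat)
      let bits_left1 := bits_left - to_fill
      let next_read_bit1 := next_read_bit + to_fill
      let st1 := if bits_left1 ≤ 0 then (out_bytes ++ [byte2], (0:Int), (8:Int)) else (out_bytes, byte2, bits_left1)
      let st2 := if next_read_bit1 ≥ chunk_bits then (next_read_chunk + 1, next_read_bit1 - chunk_bits) else (next_read_chunk, next_read_bit1)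
      decode_bitchunks_loop chunk_bits chunks fuel st2.1 st2.2 st1.2.1 st1.2.2 st1.1
    else out_bytes

def decode_bitchunks (chunk_bits : Int) (chunks : List Int) : List Int :=
  decode_bitchunks_loop chunk_bits chunks (chunks.length * chunk_bits.toNat + chunks.length + 1) 0 0 0 8 []

-- ===== PORT B =====
def decode_bitchunks_alt (chunk_bits : Int) (chunks : List Int) : List Int :=
  let bits := chunks.flatMap (fun (c : Int) =>
    (PySem.List.pyRange 0 chunk_bits 1).map (fun j => PySem.Int.band (c >>> (chunk_bits - 1 - j).toNat) 1))
  (PySem.List.pyRange 0 ((bits.length : Int) - 7) 8).foldl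
    (fun out_bytes i =>
      out_bytes ++ [(PySem.List.slice bits (some i) (some (i + 8))).foldl (fun byte bit => byte * 2 + bit) 0]) []

-- ===== PRECONDITION & SPEC =====
-- Pre_ excludes only chunk_bits < 0 with a nonempty chunks list: there Python A
-- raises ValueError ('negative shift count') on its first iteration.
def Pre_decode_bitchunks (chunk_bits : Int) (chunks : List Int) : Prop :=
  0 ≤ chunk_bits ∨ chunks = []
instance (chunk_bits : Int) (chunks : List Int) : Decidable (Pre_decode_bitchunks chunk_bits chunks) := by
  unfold Pre_decode_bitchunks; infer_instance

def pvWitness_decode_bitchunks : Int × List Int := (7, [65, -3, 127])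

def Spec_decode_bitchunks (chunk_bits : Int) (chunks : List Int) (out : List Int) : Prop := out = decode_bitchunks_alt chunk_bits chunks
instance (chunk_bits : Int) (chunks : List Int) (out : List Int) : Decidable (Spec_decode_bitchunks chunk_bits chunks out) := by unfold Spec_decode_bitchunks; infer_instance

-- ===== CLAIM (what is proved, stated in full; the proofs are below) =====
def Claim_equal_decode_bitchunks : Prop := ∀ (chunk_bits : Int) (chunks : List Int), Dom_decode_bitchunks chunk_bits chunks → Pre_decode_bitchunks chunk_bits chunks → Spec_decode_bitchunks chunk_bits chunks (decode_bitchunks chunk_bits chunks)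

-- ===== LEMMAS AND PROOFS =====

def pvPack (byte : Int) (bl : Nat) : List Int → List Int
  | [] => []
  | b :: r => if bl = 1 then (byte * 2 + b) :: pvPack 0 8 r else pvPack (byte * 2 + b) (bl - 1) r

def pvBits (cbn : Nat) (c : Int) : List Int :=
  (List.range cbn).map (fun j => PySem.Int.band (c >>> (cbn - 1 - j)) 1)

theorem pvLorAdd : ∀ (n a b : Nat), b < 2^n → a <<< n ||| b = a <<< n + b := by
  intro n
  induction n with
  | zero => intro a b hb; interval_cases b <;> simp
  | succ n ih =>
    intro a b hb
    simp only [Nat.shiftLeft_eq] at *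
    have hb' : b / 2 < 2^n := by omega
    have hx : a * 2^(n+1) = Nat.bit false (a * 2^n) := by simp [Nat.bit]; ring
    have hy : b = Nat.bit (decide (b % 2 = 1)) (b / 2) := by
      rcases Nat.mod_two_eq_zero_or_one b with h | h <;> simp [Nat.bit, h] <;> omega
    rw [hx, hy, Nat.lor_bit]
    have := ih a (b / 2) hb'
    rcases Nat.mod_two_eq_zero_or_one b with h | h <;> simp [Nat.bit, h, this] <;> omega

theorem pvModSplit (x : Int) (k : Nat) : x % 2^(k+1) = ((x / 2^k) % 2) * 2^k + x % 2^k := by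
  have hp : (0:Int) < 2^k := by positivity
  set q := x / 2^k with hq
  set r := x % 2^k with hr
  have key : 2^k * q + r = x := Int.mul_ediv_add_emod x (2^k)
  have hr1 : 0 ≤ r := Int.emod_nonneg x (by omega)
  have hr2 : r < 2^k := Int.emod_lt_of_pos x hp
  have hs1 : 0 ≤ q % 2 := Int.emod_nonneg q (by omega)
  have hs2 : q % 2 < 2 := Int.emod_lt_of_pos q (by omega)
  have keyq : 2 * (q / 2) + q % 2 = q := Int.mul_ediv_add_emod q 2
  have h := (Int.ediv_emod_unique (a := x) (b := 2^(k+1)) (r := (q % 2) * 2^k + r) (q := q / 2) (by positivity)).mpr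
    (by refine ⟨?_, by nlinarith, by rw [pow_succ]; nlinarith⟩
        rw [pow_succ]; nlinarith [keyq, key])
  rw [h.2]


theorem pvNatMask (n k off : Nat) : n &&& ((2^k - 1) <<< off) = ((n >>> off) % 2^k) <<< off := by
  apply Nat.eq_of_testBit_eq
  intro i
  simp [Nat.testBit_and, Nat.testBit_shiftLeft, Nat.testBit_mod_two_pow, Nat.testBit_shiftRight, Nat.testBit_two_pow_sub_one]
  by_cases h : off ≤ i
  · simp [h]; by_cases h2 : i - off < k <;> simp [h2] <;> omega
  · simp [h]

theorem pvNegDivMod (M P : Int) (hp : 0 < P) : (-M - 1) / P = -(M / P) - 1 ∧ (-M - 1) % P = P - 1 - M % P := by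
  have key : P * (M / P) = M - M % P := by have := Int.mul_ediv_add_emod M P; linarith
  have hb1 : 0 ≤ M % P := Int.emod_nonneg M (by omega)
  have hb2 : M % P < P := Int.emod_lt_of_pos M hp
  have h := (Int.ediv_emod_unique (a := -M - 1) (b := P) (r := P - 1 - M % P) (q := -(M / P) - 1) hp).mpr
    (by refine ⟨by linarith [key], by omega, by omega⟩)
  exact ⟨h.1, h.2⟩

theorem pvBandMask (c : Int) (k off : Nat) :
    PySem.Int.band c ((((1:Int) <<< k) - 1) <<< off) = ((c >>> off) % 2^k) * 2^off := by
  have h2k : 1 ≤ 2^k := Nat.one_le_two_pow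
  have hmask : (((1:Int) <<< k) - 1) <<< off = ((((2^k - 1) <<< off : Nat)) : Int) := by
    simp only [Int.shiftLeft_eq, Nat.shiftLeft_eq]
    push_cast [h2k]
    ring
  rw [hmask]
  by_cases hc : 0 ≤ c
  · rw [show c = ((c.toNat : Nat) : Int) from (Int.toNat_of_nonneg hc).symm]
    rw [PySem.Int.band_natCast, pvNatMask]
    rw [Int.shiftRight_eq_div_pow]
    push_cast [Nat.shiftLeft_eq, Nat.shiftRight_eq_div_pow, Int.natCast_ediv, Int.natCast_emod]
    ring
  · set m : Nat := (-c - 1).toNat with hm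
    have hc' : c = -(m : Int) - 1 := by omega
    have hband : PySem.Int.band c ((((2^k - 1) <<< off : Nat)) : Int)
        = ((((2^k - 1) <<< off) - (((2^k - 1) <<< off) &&& m) : Nat) : Int) := by
      rw [PySem.Int.band]
      have h2 : (0:Int) ≤ (((2^k - 1) <<< off : Nat) : Int) := by positivity
      simp only [hc, h2, if_true, if_false, Int.toNat_natCast]
      rw [← hm]
    rw [hband, Nat.land_comm, pvNatMask]
    have hp : (0:Int) < 2^off := by positivity
    have hk : (0:Int) < 2^k := by positivity
    have hdiv : c >>> off = -((m >>> off : Nat) : Int) - 1 := by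
      rw [Int.shiftRight_eq_div_pow, hc', Nat.shiftRight_eq_div_pow]
      have hcast : (((2:Nat)^off : Nat) : Int) = 2^off := by push_cast; ring
      rw [hcast, (pvNegDivMod (m : Int) (2^off) hp).1, Int.natCast_ediv, hcast]
    have hmod : (c >>> off) % 2^k = 2^k - 1 - (((m >>> off) % 2^k : Nat) : Int) := by
      rw [hdiv, (pvNegDivMod ((m >>> off : Nat) : Int) (2^k) hk).2]
      push_cast [Int.natCast_emod]
      ring
    rw [hmod]
    have hlt : (m >>> off) % 2^k < 2^k := Nat.mod_lt _ (by positivity)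
    have hle : ((2^k - 1) <<< off) &&& m ≤ ((2^k - 1) <<< off) := Nat.and_le_left
    rw [Nat.land_comm, pvNatMask] at hle
    have hXle : (m >>> off) % 2^k ≤ 2^k - 1 := by omega
    rw [Nat.shiftLeft_eq, Nat.shiftLeft_eq, ← Nat.sub_mul, Nat.cast_mul, Nat.cast_sub hXle, Nat.cast_sub h2k]
    push_cast
    ring

theorem pvBorAdd (B v : Int) (k : Nat) (hB : 0 ≤ B) (hv : 0 ≤ v) (h : v < 2^k) :
    PySem.Int.bor (B <<< k) v = B * 2^k + v := by
  rw [show B = ((B.toNat : Nat) : Int) from (Int.toNat_of_nonneg hB).symm,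
      show v = ((v.toNat : Nat) : Int) from (Int.toNat_of_nonneg hv).symm]
  have hcast : ((B.toNat : Int)) <<< k = ((B.toNat <<< k : Nat) : Int) := by
    rw [Int.shiftLeft_eq, Nat.shiftLeft_eq]; push_cast; ring
  rw [hcast, PySem.Int.bor_natCast]
  have hvk : v.toNat < 2^k := by
    have : ((2:Int)^k) = ((2^k : Nat) : Int) := by push_cast; ring
    omega
  rw [pvLorAdd k B.toNat v.toNat hvk]
  push_cast [Nat.shiftLeft_eq]
  ring

theorem pvFoldBits (k : Nat) : ∀ (off : Nat) (c byte : Int), 0 ≤ byte →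
    ((List.range k).map (fun j => PySem.Int.band (c >>> (off + k - 1 - j)) 1)).foldl
      (fun a b => a * 2 + b) byte = byte * 2^k + (c >>> off) % 2^k := by
  induction k with
  | zero => intro off c byte _; simp
  | succ k ih =>
    intro off c byte hbyte
    rw [List.range_succ_eq_map]
    simp only [List.map_cons, List.map_map, List.foldl_cons]
    have hfun : ((fun j => PySem.Int.band (c >>> (off + (k+1) - 1 - j)) 1) ∘ Nat.succ)
        = (fun j => PySem.Int.band (c >>> (off + k - 1 - j)) 1) := by
      funext j; simp only [Function.comp]; congr 2; omega
    have hhead : off + (k+1) - 1 - 0 = off + k := by omega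
    rw [hfun, hhead]
    have hbit : PySem.Int.band (c >>> (off + k)) 1 = (c >>> (off + k)) % 2 := by
      rw [PySem.Int.band_one, PySem.Int.mod_eq_emod_of_pos (by omega)]
    have hbit0 : 0 ≤ (c >>> (off + k)) % 2 := Int.emod_nonneg _ (by omega)
    rw [hbit, ih off c (byte * 2 + (c >>> (off + k)) % 2) (by omega)]
    have hsplit := pvModSplit (c >>> off) k
    have hshift : c >>> (off + k) = (c >>> off) / 2^k := by
      rw [Int.shiftRight_add, Int.shiftRight_eq_div_pow]
      push_cast; ring_nf
    rw [pow_succ] at hsplit ⊢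
    rw [hshift]
    have hexp : (byte * 2 + (c >>> off) / 2^k % 2) * 2^k = byte * (2^k * 2) + ((c >>> off) / 2^k % 2) * 2^k := by ring
    linarith [hsplit, hexp]

theorem pvPackNil : ∀ (bits : List Int) (byte : Int) (bl : Nat), bits.length < bl → pvPack byte bl bits = [] := by
  intro bits
  induction bits with
  | nil => intro byte bl _; rfl
  | cons b r ih =>
    intro byte bl h
    simp only [List.length_cons] at h
    rw [pvPack]
    rw [if_neg (by omega)]
    exact ih _ _ (by omega)

theorem pvPackLt : ∀ (seg : List Int) (byte : Int) (bl : Nat) (rest : List Int),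
    seg.length < bl → pvPack byte bl (seg ++ rest)
      = pvPack (seg.foldl (fun a b => a * 2 + b) byte) (bl - seg.length) rest := by
  intro seg
  induction seg with
  | nil => intro byte bl rest _; simp
  | cons b s ih =>
    intro byte bl rest h
    simp only [List.length_cons] at h
    simp only [List.cons_append, List.foldl_cons]
    rw [pvPack, if_neg (by omega), ih (byte * 2 + b) (bl - 1) rest (by omega)]
    have he : bl - 1 - s.length = bl - (s.length + 1) := by omega
    rw [he]
    simp

theorem pvPackEq : ∀ (seg : List Int) (byte : Int) (rest : List Int),
    1 ≤ seg.length → pvPack byte seg.length (seg ++ rest)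
      = (seg.foldl (fun a b => a * 2 + b) byte) :: pvPack 0 8 rest := by
  intro seg
  induction seg with
  | nil => intro _ _ h; simp at h
  | cons b s ih =>
    intro byte rest _
    simp only [List.cons_append, List.foldl_cons, List.length_cons]
    rcases List.eq_nil_or_concat s with hs | _
    · subst hs; simp [pvPack]
    · rw [pvPack]
      by_cases h1 : s.length = 0
      · have : s = [] := List.eq_nil_of_length_eq_zero h1
        subst this; simp [pvPack]
      · rw [if_neg (by omega)]
        have := ih (byte * 2 + b) rest (by omega)
        simpa using this

theorem pvAltBits (cbn : Nat) (chunks : List Int) :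
    chunks.flatMap (fun (c : Int) =>
      (PySem.List.pyRange 0 ((cbn : Int)) 1).map (fun j => PySem.Int.band (c >>> (((cbn : Int)) - 1 - j).toNat) 1))
    = chunks.flatMap (pvBits cbn) := by
  apply List.flatMap_congr
  intro c _
  rw [PySem.List.pyRange_one, List.map_map]
  unfold pvBits
  have h0 : (((cbn:Int)) - 0).toNat = cbn := by omega
  rw [h0]
  apply List.map_congr_left
  intro j hj
  simp only [Function.comp]
  have hj' : j < cbn := List.mem_range.mp hj
  congr 2
  omega

-- slices advance in step with drop 8
theorem pvSliceShift (bits : List Int) (k : Nat) :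
    PySem.List.slice bits (some ((8 * (k+1) : Nat) : Int)) (some (((8 * (k+1) : Nat) : Int) + 8))
      = PySem.List.slice (bits.drop 8) (some ((8 * k : Nat) : Int)) (some (((8 * k : Nat) : Int) + 8)) := by
  have h1 : ((8 * (k+1) : Nat) : Int) + 8 = ((8 * (k+1) + 8 : Nat) : Int) := by push_cast; ring
  have h2 : ((8 * k : Nat) : Int) + 8 = ((8 * k + 8 : Nat) : Int) := by push_cast; ring
  rw [h1, h2, PySem.List.slice_natCast, PySem.List.slice_natCast]
  have e1 : 8 * (k+1) + 8 - 8 * (k+1) = 8 := by omega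
  have e2 : 8 * k + 8 - 8 * k = 8 := by omega
  rw [e1, e2, List.drop_drop]
  congr 2
  omega

theorem pvAltPackAux : ∀ (n : Nat) (bits : List Int) (acc : List Int), bits.length < 8 * n + 8 → 8 * n ≤ bits.length →
    ((List.range n).map (fun k => ((8 * k : Nat) : Int))).foldl
      (fun out_bytes i =>
        out_bytes ++ [(PySem.List.slice bits (some i) (some (i + 8))).foldl (fun byte bit => byte * 2 + bit) 0]) acc
    = acc ++ pvPack 0 8 bits := by
  intro n
  induction n with
  | zero =>
    intro bits acc h _
    simp only [List.range_zero, List.map_nil, List.foldl_nil]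
    rw [pvPackNil bits 0 8 (by omega)]
    simp
  | succ n ih =>
    intro bits acc h h8
    rw [List.range_succ_eq_map]
    simp only [List.map_cons, List.map_map, List.foldl_cons]
    -- head: slice bits 0 8 = take 8 bits
    have hhead : PySem.List.slice bits (some ((8 * 0 : Nat) : Int)) (some (((8 * 0 : Nat) : Int) + 8))
        = bits.take 8 := by
      norm_num
      rw [PySem.List.slice_to _ (by omega)]
      rfl
    -- tail: re-index over drop 8
    have htail : ∀ (acc' : List Int),
        ((List.range n).map ((fun k => ((8 * k : Nat) : Int)) ∘ Nat.succ)).foldl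
          (fun out_bytes i =>
            out_bytes ++ [(PySem.List.slice bits (some i) (some (i + 8))).foldl (fun byte bit => byte * 2 + bit) 0]) acc'
        = ((List.range n).map (fun k => ((8 * k : Nat) : Int))).foldl
          (fun out_bytes i =>
            out_bytes ++ [(PySem.List.slice (bits.drop 8) (some i) (some (i + 8))).foldl (fun byte bit => byte * 2 + bit) 0]) acc' := by
      intro acc'
      rw [List.foldl_map, List.foldl_map]
      apply PySem.List.foldl_congr_mem
      intro a k _
      simp only [Function.comp]
      rw [pvSliceShift]
    rw [htail]
    -- bits = take 8 ++ drop 8; pvPack splits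
    have hlen : (bits.take 8).length = 8 := by
      rw [List.length_take]; omega
    have hsplit : pvPack 0 8 bits = ((bits.take 8).foldl (fun a b => a * 2 + b) 0) :: pvPack 0 8 (bits.drop 8) := by
      have h2 := pvPackEq (bits.take 8) 0 (bits.drop 8) (by omega)
      rw [hlen, List.take_append_drop] at h2
      exact h2
    rw [hsplit, hhead]
    have := ih (bits.drop 8) (acc ++ [(bits.take 8).foldl (fun a b => a * 2 + b) 0])
      (by rw [List.length_drop]; omega) (by rw [List.length_drop]; omega)
    rw [this]
    simp

theorem pvAltPack (bits : List Int) (acc : List Int) :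
    (PySem.List.pyRange 0 ((bits.length : Int) - 7) 8).foldl
      (fun out_bytes i =>
        out_bytes ++ [(PySem.List.slice bits (some i) (some (i + 8))).foldl (fun byte bit => byte * 2 + bit) 0]) acc
    = acc ++ pvPack 0 8 bits := by
  rw [PySem.List.pyRange_of_pos _ _ (by omega)]
  have hn : (if (0:Int) < (bits.length : Int) - 7 then ((((bits.length : Int) - 7) - 0 + 8 - 1)/8).toNat else 0) = bits.length / 8 := by
    split <;> omega
  have hf : (fun k : Nat => (0:Int) + 8 * (k:Int)) = (fun k : Nat => ((8 * k : Nat) : Int)) := by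
    funext k; push_cast; ring
  rw [hn, hf]
  exact pvAltPackAux (bits.length / 8) bits acc (by omega) (by omega)

theorem pvLenBits (cbn : Nat) (c : Int) : (pvBits cbn c).length = cbn := by
  simp [pvBits]

-- the k-bit segment of the remaining stream, as A reads it
theorem pvSeg (cbn nbn k : Nat) (c : Int) (hnb : nbn ≤ cbn) (hk : k ≤ cbn - nbn) :
    ((pvBits cbn c).drop nbn).take k
      = (List.range k).map (fun j => PySem.Int.band (c >>> ((cbn - nbn - k) + k - 1 - j)) 1) := by
  unfold pvBits
  rw [← List.map_drop, ← List.map_take]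
  apply List.ext_getElem
  · simp; omega
  · intro i h1 h2
    simp only [List.getElem_map, List.getElem_take, List.getElem_drop, List.getElem_range]
    congr 2
    simp only [List.length_map, List.length_take, List.length_drop, List.length_range] at h1 h2
    omega

theorem pvLoopEq (cbn : Nat) (chunks : List Int) :
    ∀ (fuel ncn nbn : Nat) (byte : Int) (bln : Nat) (acc : List Int),
    ncn ≤ chunks.length → (nbn < cbn ∨ nbn = 0) → 1 ≤ bln → bln ≤ 8 → 0 ≤ byte →
    (chunks.length - ncn) * cbn - nbn + (chunks.length - ncn) < fuel →
    decode_bitchunks_loop (cbn : Int) chunks fuel (ncn : Int) (nbn : Int) byte (bln : Int) acc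
      = acc ++ pvPack byte bln (((chunks.drop ncn).flatMap (pvBits cbn)).drop nbn) := by
  intro fuel
  induction fuel with
  | zero => intro ncn nbn byte bln acc _ _ _ _ _ hf; omega
  | succ fuel ih =>
    intro ncn nbn byte bln acc hnc hnb hbl1 hbl8 hbyte hf
    by_cases hrun : ncn < chunks.length
    case neg =>
      have hstop : ¬ ((ncn : Int) < (chunks.length : Int)) := by exact_mod_cast hrun
      rw [decode_bitchunks_loop, if_neg hstop]
      have h0 : chunks.drop ncn = [] := List.drop_of_length_le (by omega)
      rw [h0]
      simp [pvPack]
    case pos =>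
    have hlt : ((ncn : Int) < (chunks.length : Int)) := by exact_mod_cast hrun
    -- abbreviations
    set L := chunks.length with hL
    set c := chunks[ncn] with hc
    set k := min bln (cbn - nbn) with hkdef
    set off := cbn - nbn - k with hoff
    have hnbcb : nbn ≤ cbn := by omega
    have hkbl : k ≤ bln := by omega
    have hkcb : k ≤ cbn - nbn := by omega
    -- the segment and the remainder
    set T := (chunks.drop (ncn+1)).flatMap (pvBits cbn) with hT
    set D := (pvBits cbn c).drop nbn with hD
    have hDlen : D.length = cbn - nbn := by rw [hD, List.length_drop, pvLenBits]
    have hdropc : chunks.drop ncn = c :: chunks.drop (ncn+1) := List.drop_eq_getElem_cons hrun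
    have hrem : ((chunks.drop ncn).flatMap (pvBits cbn)).drop nbn = D ++ T := by
      rw [hdropc, List.flatMap_cons, List.drop_append_of_le_length (by rw [pvLenBits]; exact hnbcb)]
    set seg := (List.range k).map (fun j => PySem.Int.band (c >>> (off + k - 1 - j)) 1) with hsegdef
    have hseg : D.take k = seg := pvSeg cbn nbn k c hnbcb hkcb
    have hseglen : seg.length = k := by simp [hsegdef]
    -- the new byte value
    have hpow : (0:Int) < 2^k := by positivity
    have hfield1 : 0 ≤ (c >>> off) % 2^k := Int.emod_nonneg _ (by omega)
    have hfield2 : (c >>> off) % 2^k < 2^k := Int.emod_lt_of_pos _ hpow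
    have hbyte2 : PySem.Int.bor (byte <<< k)
        ((PySem.Int.band c ((((1:Int) <<< k) - 1) <<< off)) >>> off)
        = seg.foldl (fun a b => a * 2 + b) byte := by
      have hcp : (((2:Nat)^off : Nat) : Int) = 2^off := by push_cast; ring
      rw [pvBandMask, Int.shiftRight_eq_div_pow, hcp]
      rw [Int.mul_ediv_cancel _ (by positivity)]
      rw [pvBorAdd byte _ k hbyte hfield1 hfield2]
      rw [hsegdef, pvFoldBits k off c byte hbyte]
    have hbyte2nn : 0 ≤ seg.foldl (fun a b => a * 2 + b) byte := by
      rw [hsegdef, pvFoldBits k off c byte hbyte]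
      have := mul_nonneg hbyte hpow.le
      linarith [hfield1]
    -- unfold one loop iteration
    rw [decode_bitchunks_loop, if_pos hlt]
    have hmin : min (bln : Int) ((cbn : Int) - (nbn : Int)) = (k : Int) := by omega
    have hofftn : (((cbn : Int) - (nbn : Int) - ((k:Nat) : Int)).toNat) = off := by omega
    have hget : PySem.List.pyGetD chunks ((ncn : Nat) : Int) 0 = c := by
      rw [PySem.List.pyGetD_natCast, List.getD_eq_getElem?_getD, List.getElem?_eq_getElem hrun]
      rfl
    simp only [hmin, Int.toNat_natCast, hofftn, hget, hbyte2]
    -- fuel bookkeeping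
    obtain ⟨b, hb⟩ : ∃ b, L - ncn = b + 1 := ⟨L - ncn - 1, by omega⟩
    have hbmul : (b + 1) * cbn = b * cbn + cbn := by ring
    rw [hb, hbmul] at hf
    have hb' : L - (ncn + 1) = b := by omega
    generalize hBB : b * cbn = BB at hf
    -- case split on the two branches
    by_cases hemit : k = bln
    · by_cases hadv : cbn ≤ nbn + k
      · -- emit byte, advance chunk
        have hkeq : k = cbn - nbn := by omega
        rw [if_pos (show (bln:Int) - ↑k ≤ 0 by omega), if_pos (show (nbn:Int) + ↑k ≥ ↑cbn by exact_mod_cast by omega)]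
        dsimp only
        have hDseg : D = seg := by
          rw [← hseg, List.take_of_length_le (by omega)]
        rw [show (nbn:Int) + ↑k - ↑cbn = (0:Int) from by omega]
        have H := ih (ncn + 1) 0 0 8 (acc ++ [seg.foldl (fun a b => a * 2 + b) byte])
          (by omega) (by omega) (by omega) (by omega) (by omega)
          (by rw [hb', hBB]; omega)
        rw [List.drop_zero] at H
        push_cast at H
        rw [H, hrem, hDseg, show bln = seg.length from by omega,
            pvPackEq seg byte T (by omega)]
        simp [List.append_assoc, ← hT]
      · -- emit byte, stay in chunk
        have hkbln : k = bln := hemit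
        have hstay : nbn + k < cbn := by omega
        rw [if_pos (show (bln:Int) - ↑k ≤ 0 by omega), if_neg (show ¬ ((nbn:Int) + ↑k ≥ ↑cbn) by push_cast; omega)]
        dsimp only
        have H := ih ncn (nbn + k) 0 8 (acc ++ [seg.foldl (fun a b => a * 2 + b) byte])
          (by omega) (by omega) (by omega) (by omega) (by omega)
          (by rw [hb, hbmul, hBB]; omega)
        have hrem2 : List.drop (nbn + k) (List.flatMap (pvBits cbn) (List.drop ncn chunks)) = D.drop k ++ T := by
          rw [hdropc, List.flatMap_cons, List.drop_append_of_le_length (by rw [pvLenBits]; omega), hD, List.drop_drop]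
        have hsplitD : D ++ T = seg ++ (D.drop k ++ T) := by
          rw [← hseg, ← List.append_assoc, List.take_append_drop]
        push_cast at H
        rw [H, hrem2, hrem, hsplitD, show bln = seg.length from by omega,
            pvPackEq seg byte (D.drop k ++ T) (by omega)]
        simp [List.append_assoc]
    · -- no byte emitted: the chunk must be exhausted
      have hadv : cbn ≤ nbn + k := by omega
      have hkeq : k = cbn - nbn := by omega
      rw [if_neg (show ¬ ((bln:Int) - ↑k ≤ 0) by omega), if_pos (show (nbn:Int) + ↑k ≥ ↑cbn by push_cast; omega)]
      dsimp only
      have hDseg : D = seg := by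
        rw [← hseg, List.take_of_length_le (by omega)]
      rw [show (nbn:Int) + ↑k - ↑cbn = (0:Int) from by omega,
          show (bln:Int) - ↑k = ((bln - k : Nat) : Int) from by push_cast; omega]
      have H := ih (ncn + 1) 0 (seg.foldl (fun a b => a * 2 + b) byte) (bln - k) acc
        (by omega) (by omega) (by omega) (by omega) hbyte2nn
        (by rw [hb', hBB]; omega)
      rw [List.drop_zero] at H
      push_cast at H
      rw [H, hrem, hDseg]
      rw [pvPackLt seg byte bln T (by omega), hseglen]


-- ===== VERDICT (by name: the statement is the Claim_ definition above) =====
theorem decode_bitchunks_spec : Claim_equal_decode_bitchunks := by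
  intro chunk_bits chunks _ hpre
  unfold Spec_decode_bitchunks
  by_cases hcb : 0 ≤ chunk_bits
  · obtain ⟨cbn, rfl⟩ : ∃ n : Nat, chunk_bits = (n : Int) := ⟨chunk_bits.toNat, by omega⟩
    -- A's side
    have hfuel : (chunks.length - 0) * cbn - 0 + (chunks.length - 0) < chunks.length * ((cbn : Int)).toNat + chunks.length + 1 := by
      have : ((cbn : Int)).toNat = cbn := by omega
      rw [this]
      generalize chunks.length * cbn = P
      omega
    have HA := pvLoopEq cbn chunks (chunks.length * ((cbn : Int)).toNat + chunks.length + 1) 0 0 0 8 []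
      (by omega) (by omega) (by omega) (by omega) (by omega) hfuel
    push_cast at HA
    rw [decode_bitchunks, HA, List.drop_zero, List.drop_zero, List.nil_append]
    -- B's side
    rw [decode_bitchunks_alt]
    rw [pvAltBits cbn chunks, pvAltPack (chunks.flatMap (pvBits cbn)) []]
    rw [List.nil_append]
  · have hnil : chunks = [] := by
      rcases hpre with h | h
      · omega
      · exact h
    subst hnil
    rw [decode_bitchunks, decode_bitchunks_loop]
    rw [if_neg (by simp)]
    rw [decode_bitchunks_alt]
    simp only [List.flatMap_nil, List.length_nil]
    rw [PySem.List.pyRange_of_pos _ _ (by omega)]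
    rw [if_neg (by omega)]
    simp
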